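-- pv_equiv track=rewrite | github.com/k-sap/Corneferencer | corneferencer/inout/mmax.py | get_mention_end
-- ===== SOURCE A (Python) =====
-- def word_to_ignore(word):
--     if word['ctag'] == 'interp':
--         return True
--     return False
--
-- def get_mention_end(last_word, words):
--     end = 0
--     for word in words:
--         if not word_to_ignore(word):
--             end += 1
--         if word['id'] == last_word['id']:
--             break
--     return end
-- ===== SOURCE B (Python) =====
-- def get_mention_end(last_word, words):
--     # locate the stop index, then count non-interp words in the inclusive prefix
--     k = next((i for i, w in enumerate(words) if w['id'] == last_word['id']),
--              len(words) - 1) if words else -1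
--     return sum(1 for w in words[:k + 1] if w['ctag'] != 'interp')
-- ===== Notes on version B (the rewrite author's own statement) =====
-- stated objective: alternative
-- what changed: Replaces the fused count-and-break loop by two separate passes: first locate the stop index (first word whose id matches, defaulting to the whole list), then count non-interp entries over the inclusive prefix slice.
import Mathlib
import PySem

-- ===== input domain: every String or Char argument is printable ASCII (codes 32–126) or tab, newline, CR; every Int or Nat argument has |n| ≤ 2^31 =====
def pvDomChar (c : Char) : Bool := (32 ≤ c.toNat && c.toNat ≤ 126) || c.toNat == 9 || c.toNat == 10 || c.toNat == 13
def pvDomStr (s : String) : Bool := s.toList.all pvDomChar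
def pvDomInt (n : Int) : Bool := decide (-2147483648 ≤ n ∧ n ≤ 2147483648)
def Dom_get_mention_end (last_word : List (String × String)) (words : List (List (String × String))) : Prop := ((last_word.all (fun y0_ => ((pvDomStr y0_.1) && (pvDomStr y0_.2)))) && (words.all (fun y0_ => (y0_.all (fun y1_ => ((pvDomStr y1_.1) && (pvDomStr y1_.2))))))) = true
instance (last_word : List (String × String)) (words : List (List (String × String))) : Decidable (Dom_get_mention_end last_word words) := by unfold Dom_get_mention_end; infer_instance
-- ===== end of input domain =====

-- ===== PORT A =====
-- B splits A's fused count-and-break loop into a locate-stop-index pass followed by a count over the inclusive prefix.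

-- Python dict lookup d[k] (first match); KeyError is excluded by Pre_, so the default "" is never reached inside Pre_.
def pvLookup (d : List (String × String)) (k : String) : String :=
  ((d.find? (fun p => p.1 == k)).map (·.2)).getD ""

def word_to_ignore (word : List (String × String)) : Bool :=
  if pvLookup word "ctag" == "interp" then true else false

def getMentionEndLoop (last_word : List (String × String)) :
    List (List (String × String)) → Int → Int
  | [], e => e
  | w :: ws, e =>
    let e' := if !(word_to_ignore w) then e + 1 else e
    if pvLookup w "id" == pvLookup last_word "id" then e' else getMentionEndLoop last_word ws e'

def get_mention_end (last_word : List (String × String)) (words : List (List (String × String))) : Int :=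
  getMentionEndLoop last_word words 0

-- ===== PORT B =====
-- first index i with words[i]['id'] == lid (the Python next(... for i, w in enumerate(words) ...))
def bFindIdx (lid : String) : List (List (String × String)) → Option Nat
  | [] => none
  | w :: ws => if pvLookup w "id" == lid then some 0 else (bFindIdx lid ws).map (· + 1)

def get_mention_end_alt (last_word : List (String × String)) (words : List (List (String × String))) : Int :=
  let k : Int :=
    if words.isEmpty then -1
    else match bFindIdx (pvLookup last_word "id") words with
      | some i => (i : Int)
      | none => (words.length : Int) - 1
  -- words[:k+1] with k + 1 ≥ 0 is take (k+1); sum(1 for w in ... if w['ctag'] != 'interp') is countP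
  ((words.take (k + 1).toNat).countP (fun w => !(pvLookup w "ctag" == "interp")) : Int)

-- ===== PRECONDITION & SPEC =====
-- Pre_ excludes exactly the inputs where Python A raises KeyError: a word missing 'ctag' or 'id'
-- at or before the stop position (the first 'id' match, or the last word when none matches), or
-- last_word missing 'id' while words is nonempty.
def Pre_get_mention_end (last_word : List (String × String)) (words : List (List (String × String))) : Prop :=
  words = [] ∨
  (((last_word.find? (fun p => p.1 == "id")).isSome = true) ∧
    ∀ i < words.length,
      i ≤ min (words.findIdx (fun w => w.find? (fun p => p.1 == "id") == last_word.find? (fun p => p.1 == "id"))) (words.length - 1) →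
      ∀ w, words[i]? = some w →
        ((w.find? (fun p => p.1 == "ctag")).isSome = true ∧ (w.find? (fun p => p.1 == "id")).isSome = true))
instance (last_word : List (String × String)) (words : List (List (String × String))) : Decidable (Pre_get_mention_end last_word words) := by unfold Pre_get_mention_end; infer_instance

def pvWitness_get_mention_end : (List (String × String)) × (List (List (String × String))) :=
  ([("id", "w1")], [[("ctag", "subst"), ("id", "w0")], [("ctag", "interp"), ("id", "w1")]])

def Spec_get_mention_end (last_word : List (String × String)) (words : List (List (String × String))) (out : Int) : Prop := out = get_mention_end_alt last_word words
instance (last_word : List (String × String)) (words : List (List (String × String))) (out : Int) : Decidable (Spec_get_mention_end last_word words out) := by unfold Spec_get_mention_end; infer_instance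

-- ===== CLAIM (what is proved, stated in full; the proofs are below) =====
def Claim_equal_get_mention_end : Prop := ∀ (last_word : List (String × String)) (words : List (List (String × String))), Dom_get_mention_end last_word words → Pre_get_mention_end last_word words → Spec_get_mention_end last_word words (get_mention_end last_word words)

-- ===== LEMMAS AND PROOFS =====

theorem alt_nil (lw : List (String × String)) : get_mention_end_alt lw [] = 0 := rfl

theorem toNat_cast_add_one (n : Nat) : ((n : Int) + 1).toNat = n + 1 := by omega

theorem alt_cons (lw : List (String × String)) (w : List (String × String))
    (ws : List (List (String × String))) :
    get_mention_end_alt lw (w :: ws) =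
      (if !(pvLookup w "ctag" == "interp") then (1 : Int) else 0) +
        (if pvLookup w "id" == pvLookup lw "id" then 0 else get_mention_end_alt lw ws) := by
  simp only [get_mention_end_alt, List.isEmpty_cons, Bool.false_eq_true, if_false, bFindIdx]
  by_cases h : pvLookup w "id" == pvLookup lw "id"
  · by_cases hc : pvLookup w "ctag" == "interp" <;>
      simp [h, hc, List.countP_cons]
  · have hcount : ∀ n, List.countP (fun w => !pvLookup w "ctag" == "interp") (List.take (n+1) (w :: ws)) = (if !(pvLookup w "ctag" == "interp") then 1 else 0) + List.countP (fun w => !pvLookup w "ctag" == "interp") (List.take n ws) := by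
      intro n
      simp only [List.take_succ_cons, List.countP_cons]
      by_cases hc : pvLookup w "ctag" == "interp" <;> simp [hc] <;> omega
    cases hf : bFindIdx (pvLookup lw "id") ws with
    | some i =>
      have hne : ws.isEmpty = false := by
        cases ws with
        | nil => simp [bFindIdx] at hf
        | cons x xs => rfl
      simp only [h, hf, hne, Bool.false_eq_true, if_false, Option.map_some, toNat_cast_add_one]
      rw [hcount]
      push_cast
      by_cases hc : pvLookup w "ctag" == "interp" <;> simp [hc] <;> ring
    | none =>
      simp only [h, hf, Bool.false_eq_true, if_false, Option.map_none]
      have h1 : ((↑(w :: ws).length : Int) - 1 + 1).toNat = ws.length + 1 := by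
        simp only [List.length_cons]; omega
      rw [h1, hcount]
      have h2 : ((if ws.isEmpty = true then (-1 : Int) else (ws.length : Int) - 1) + 1).toNat = ws.length := by
        cases ws with
        | nil => simp
        | cons x xs =>
          simp only [List.isEmpty_cons, Bool.false_eq_true, if_false, List.length_cons]
          omega
      rw [h2, List.take_length]
      push_cast
      by_cases hc : pvLookup w "ctag" == "interp" <;> simp [hc] <;> ring

theorem loop_eq (lw : List (String × String)) (ws : List (List (String × String))) (e : Int) :
    getMentionEndLoop lw ws e = e + get_mention_end_alt lw ws := by
  induction ws generalizing e with
  | nil => simp [getMentionEndLoop, alt_nil]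
  | cons w ws ih =>
    rw [alt_cons]
    simp only [getMentionEndLoop]
    have hw : (!(word_to_ignore w)) = (!(pvLookup w "ctag" == "interp")) := by
      by_cases hc : pvLookup w "ctag" == "interp" <;> simp [word_to_ignore, hc]
    rw [hw]
    by_cases h : pvLookup w "id" == pvLookup lw "id"
    · by_cases hc : pvLookup w "ctag" == "interp" <;> simp [h, hc]
    · simp only [h, Bool.false_eq_true, if_false, ih]
      by_cases hc : pvLookup w "ctag" == "interp" <;> simp [hc] <;> ring

-- ===== VERDICT (by name: the statement is the Claim_ definition above) =====
theorem get_mention_end_spec : Claim_equal_get_mention_end := by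
  intro lw ws _ _
  unfold Spec_get_mention_end get_mention_end
  rw [loop_eq]
  ring
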